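-- pv_equiv track=rewrite | github.com/devmessias/gsql2rsql | src/gsql2rsql/renderer/expression_renderer.py | _build_named_struct
-- ===== SOURCE A (Python) =====
-- def _build_named_struct(
--     props: list[tuple[str, str]], fallback_id_col: str
-- ) -> str:
--     """Deduplicate, sort, and format as NAMED_STRUCT."""
--     seen: set[str] = set()
--     sorted_props = []
--     for prop_name, sql_col in sorted(props, key=lambda x: x[0]):
--         if prop_name not in seen:
--             seen.add(prop_name)
--             sorted_props.append((prop_name, sql_col))
--
--     if sorted_props:
--         parts = [f"'{pn}', {sc}" for pn, sc in sorted_props]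
--         return f"NAMED_STRUCT({', '.join(parts)})"
--     return f"NAMED_STRUCT('id', {fallback_id_col})"
-- ===== SOURCE B (Python) =====
-- def _build_named_struct(
--     props: list[tuple[str, str]], fallback_id_col: str
-- ) -> str:
--     """Selection: repeatedly emit the smallest remaining name (first value wins)."""
--     parts = []
--     rest = props
--     while rest:
--         k = min(pn for pn, _ in rest)
--         sc = next(sc for pn, sc in rest if pn == k)
--         parts.append(f"'{k}', {sc}")
--         rest = [(pn, sc) for pn, sc in rest if pn != k]
--     if parts:
--         return f"NAMED_STRUCT({', '.join(parts)})"
--     return f"NAMED_STRUCT('id', {fallback_id_col})"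
-- ===== Notes on version B (the rewrite author's own statement) =====
-- stated objective: alternative
-- what changed: A sorts the whole prop list and then dedupes with a seen-set in one scan; B uses no sort, no set and no dict at all: a selection loop that repeatedly takes the minimum remaining name, emits its first value, and filters all pairs with that name out of the worklist.
import Mathlib
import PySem

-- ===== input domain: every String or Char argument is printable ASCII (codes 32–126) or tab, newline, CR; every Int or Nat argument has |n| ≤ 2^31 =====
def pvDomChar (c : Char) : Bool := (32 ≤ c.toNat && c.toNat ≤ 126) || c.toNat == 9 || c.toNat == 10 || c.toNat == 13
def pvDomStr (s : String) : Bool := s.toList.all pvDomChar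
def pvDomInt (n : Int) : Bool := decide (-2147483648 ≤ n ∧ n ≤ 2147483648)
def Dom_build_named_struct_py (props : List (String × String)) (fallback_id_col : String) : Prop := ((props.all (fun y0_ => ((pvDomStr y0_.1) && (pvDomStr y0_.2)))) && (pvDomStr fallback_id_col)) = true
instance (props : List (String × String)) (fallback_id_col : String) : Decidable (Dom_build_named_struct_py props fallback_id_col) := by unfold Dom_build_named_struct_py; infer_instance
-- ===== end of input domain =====

-- B replaces A's sort-then-seen-set-dedup by a selection loop: repeatedly emit the minimum
-- remaining name with its first value and filter that name out of the worklist (objective: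
-- alternative — no sort, no set, no dict).

-- ===== PORT A =====
-- A: sort props by name (stable), dedup keeping the first per name, then format.
def build_named_struct_py (props : List (String × String)) (fallback_id_col : String) : String :=
  let sorted_props :=
    ((PySem.List.sorted props (fun x => x.1) false).foldl
      (fun (st : PySem.Set String × List (String × String)) p =>
        if PySem.Set.contains st.1 p.1 then st
        else (PySem.Set.add st.1 p.1, st.2 ++ [p]))
      (PySem.Set.empty, [])).2
  if sorted_props ≠ [] then
    "NAMED_STRUCT(" ++
      PySem.Str.join ", " (sorted_props.map (fun p => "'" ++ p.1 ++ "', " ++ p.2)) ++ ")"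
  else
    "NAMED_STRUCT('id', " ++ fallback_id_col ++ ")"

-- ===== PORT B =====
-- the min of the remaining names (total via getD; the worklist is nonempty at every call)
def pvSelKey (p : String × String) (t : List (String × String)) : String :=
  (PySem.List.min? ((p :: t).map Prod.fst) (fun x => x)).getD ""

-- next(sc for pn, sc in rest if pn == k): the first value carried by the min name
def pvSelVal (p : String × String) (t : List (String × String)) : String :=
  (((p :: t).find? (fun q => q.1 == pvSelKey p t)).map Prod.snd).getD ""

theorem pvSelKey_mem (p : String × String) (t : List (String × String)) :
    pvSelKey p t ∈ (p :: t).map Prod.fst := by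
  have h : PySem.List.min? ((p :: t).map Prod.fst) (fun x => x)
      = some (pvSelKey p t) := by
    cases hm : PySem.List.min? ((p :: t).map Prod.fst) (fun x => x) with
    | none => exact absurd ((PySem.List.min?_eq_none_iff _ _).mp hm) (by simp)
    | some m =>
      simp only [List.map_cons] at hm ⊢
      simp [pvSelKey, List.map_cons, hm]
  exact PySem.List.min?_mem h

-- B's while loop: one formatted part per selection round, worklist filtered each round
def pvSelParts : List (String × String) → List String
  | [] => []
  | p :: t =>
    ("'" ++ pvSelKey p t ++ "', " ++ pvSelVal p t) ::
      pvSelParts ((p :: t).filter (fun q => !(q.1 == pvSelKey p t)))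
termination_by l => l.length
decreasing_by
  simp only [List.length_filter_lt_length_iff_exists]
  obtain ⟨q, hq, hqk⟩ := List.mem_map.mp (pvSelKey_mem p t)
  exact ⟨q, hq, by simp [hqk]⟩

def build_named_struct_py_alt (props : List (String × String)) (fallback_id_col : String) : String :=
  let parts := pvSelParts props
  if parts ≠ [] then
    "NAMED_STRUCT(" ++ PySem.Str.join ", " parts ++ ")"
  else
    "NAMED_STRUCT('id', " ++ fallback_id_col ++ ")"

-- ===== PRECONDITION & SPEC =====
def Spec_build_named_struct_py (props : List (String × String)) (fallback_id_col : String) (out : String) : Prop := out = build_named_struct_py_alt props fallback_id_col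
instance (props : List (String × String)) (fallback_id_col : String) (out : String) : Decidable (Spec_build_named_struct_py props fallback_id_col out) := by unfold Spec_build_named_struct_py; infer_instance

-- ===== CLAIM =====
def Claim_equal_build_named_struct_py : Prop := ∀ (props : List (String × String)) (fallback_id_col : String), Dom_build_named_struct_py props fallback_id_col → Spec_build_named_struct_py props fallback_id_col (build_named_struct_py props fallback_id_col)

-- ===== LEMMAS AND PROOFS =====

-- the first value a list associates with a name (getD-total, like pvSelVal)
def pvFv (L : List (String × String)) (k : String) : String :=
  ((L.find? (fun q => q.1 == k)).map Prod.snd).getD ""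

-- canonical result: sorted distinct names, each paired with its first value
def pvCanon (L : List (String × String)) : List (String × String) :=
  (PySem.List.sorted (PySem.Set.ofList (L.map Prod.fst)) (fun x => x) false).map
    (fun k => (k, pvFv L k))

def pvFmt (p : String × String) : String := "'" ++ p.1 ++ "', " ++ p.2

-- A's dedup loop, as a recursion over the (already sorted) list with an explicit seen list.
def dedupA (seen : List String) : List (String × String) → List (String × String)
  | [] => []
  | p :: t => if p.1 ∈ seen then dedupA seen t else p :: dedupA (seen ++ [p.1]) t

theorem foldA_eq (L : List (String × String)) :
    ∀ (s : PySem.Set String) (acc : List (String × String)),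
    (L.foldl
      (fun (st : PySem.Set String × List (String × String)) p =>
        if PySem.Set.contains st.1 p.1 then st
        else (PySem.Set.add st.1 p.1, st.2 ++ [p]))
      (s, acc)).2 = acc ++ dedupA s L := by
  induction L with
  | nil => intro s acc; simp [dedupA]
  | cons p t ih =>
    intro s acc
    simp only [List.foldl_cons, dedupA]
    by_cases h : p.1 ∈ s
    · rw [if_pos ((PySem.Set.contains_iff s p.1).mpr h), if_pos h, ih]
    · have hc : PySem.Set.contains s p.1 = false := by
        simp only [PySem.Set.contains_iff, Bool.eq_false_iff, ne_eq]
        exact h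
      have hadd : PySem.Set.add s p.1 = s ++ [p.1] := by
        simp only [PySem.Set.add, hc]
        exact if_neg (by simp)
      rw [if_neg (by rw [hc]; exact Bool.false_ne_true), if_neg h, hadd, ih]
      simp

-- inserting x with the strict `before` of A's sort keeps the accumulator key-sorted
theorem insertBy_pairwise (x : String × String) (ys : List (String × String))
    (h : ys.Pairwise (fun a b => a.1 ≤ b.1)) :
    (PySem.List.insertBy (fun a b => decide (a.1 < b.1)) x ys).Pairwise (fun a b => a.1 ≤ b.1) := by
  induction ys with
  | nil => simp [PySem.List.insertBy]
  | cons y t ih =>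
    rw [List.pairwise_cons] at h
    obtain ⟨hy, ht⟩ := h
    by_cases hb : x.1 < y.1
    · rw [PySem.List.insertBy, if_pos (by simpa using hb)]
      refine List.Pairwise.cons ?_ (List.Pairwise.cons hy ht)
      intro z hz
      rcases List.mem_cons.mp hz with rfl | hz
      · exact le_of_lt hb
      · exact le_trans (le_of_lt hb) (hy z hz)
    · rw [PySem.List.insertBy, if_neg (by simpa using hb)]
      refine List.Pairwise.cons ?_ (ih ht)
      intro z hz
      rcases (PySem.List.mem_insertBy _ x z t).mp hz with rfl | hz
      · exact le_of_not_gt hb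
      · exact hy z hz

-- stability: filtering one key through the insertion appends x at the end
theorem insertBy_filter (k : String) (x : String × String) (ys : List (String × String))
    (h : ys.Pairwise (fun a b => a.1 ≤ b.1)) :
    (PySem.List.insertBy (fun a b => decide (a.1 < b.1)) x ys).filter (fun p => p.1 == k)
      = ys.filter (fun p => p.1 == k) ++ [x].filter (fun p => p.1 == k) := by
  induction ys with
  | nil => simp [PySem.List.insertBy]
  | cons y t ih =>
    rw [List.pairwise_cons] at h
    obtain ⟨hy, ht⟩ := h
    by_cases hb : x.1 < y.1
    · rw [PySem.List.insertBy, if_pos (by simpa using hb)]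
      by_cases hx : x.1 = k
      · have hnil : (y :: t).filter (fun p => p.1 == k) = [] := by
          rw [List.filter_eq_nil_iff]
          intro z hz
          have : ¬ z.1 = k := by
            rcases List.mem_cons.mp hz with rfl | hz
            · exact fun hk => absurd hb (by simp [hk, ← hx])
            · have hlt := lt_of_lt_of_le hb (hy z hz)
              exact fun hk => absurd hlt (by simp [hk, hx])
          simpa using this
        simp [hnil, hx]
      · simp [List.filter_cons, hx]
    · rw [PySem.List.insertBy, if_neg (by simpa using hb)]
      simp only [List.filter_cons]
      rw [ih ht]
      by_cases hyk : y.1 = k <;> by_cases hxk : x.1 = k <;> simp [hyk, hxk]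

theorem foldl_insertBy_filter (k : String) (xs : List (String × String)) :
    ∀ (acc : List (String × String)), acc.Pairwise (fun a b => a.1 ≤ b.1) →
    (xs.foldl (fun a x => PySem.List.insertBy (fun a b => decide (a.1 < b.1)) x a) acc).filter
        (fun p => p.1 == k)
      = acc.filter (fun p => p.1 == k) ++ xs.filter (fun p => p.1 == k) := by
  induction xs with
  | nil => intro acc h; simp
  | cons x t ih =>
    intro acc h
    simp only [List.foldl_cons]
    rw [ih _ (insertBy_pairwise x acc h), insertBy_filter k x acc h]
    by_cases hx : x.1 = k <;> simp [hx]

-- the stable sort does not change which pair is the FIRST one carrying a given key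
theorem find?_sorted (k : String) (props : List (String × String)) :
    (PySem.List.sorted props (fun x => x.1) false).find? (fun p => p.1 == k)
      = props.find? (fun p => p.1 == k) := by
  rw [← List.head?_filter, ← List.head?_filter]
  have hdef : PySem.List.sorted props (fun x => x.1) false
      = props.foldl (fun a x => PySem.List.insertBy (fun a b => decide (a.1 < b.1)) x a) [] := by
    simp [PySem.List.sorted]
  rw [hdef, foldl_insertBy_filter k props [] (by simp)]
  simp

theorem dedupA_sublist (L : List (String × String)) :
    ∀ seen, (dedupA seen L).Sublist L := by
  induction L with
  | nil => intro seen; simp [dedupA]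
  | cons p t ih =>
    intro seen
    rw [dedupA]
    by_cases h : p.1 ∈ seen
    · rw [if_pos h]; exact (ih seen).cons p
    · rw [if_neg h]; exact (ih (seen ++ [p.1])).cons₂ p

theorem mem_map_fst_dedupA (L : List (String × String)) :
    ∀ seen k, k ∈ (dedupA seen L).map Prod.fst ↔ k ∉ seen ∧ k ∈ L.map Prod.fst := by
  induction L with
  | nil => intro seen k; simp [dedupA]
  | cons p t ih =>
    intro seen k
    rw [dedupA]
    by_cases h : p.1 ∈ seen
    · rw [if_pos h, ih]
      constructor
      · rintro ⟨hk, hm⟩; exact ⟨hk, by simp [hm]⟩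
      · rintro ⟨hk, hm⟩
        rcases (by simpa using hm : k = p.1 ∨ k ∈ t.map Prod.fst) with rfl | hm
        · exact absurd h hk
        · exact ⟨hk, hm⟩
    · rw [if_neg h]
      simp only [List.map_cons, List.mem_cons, ih]
      constructor
      · rintro (rfl | ⟨hk, hm⟩)
        · exact ⟨h, Or.inl rfl⟩
        · exact ⟨fun hs => hk (by simp [hs]), Or.inr hm⟩
      · rintro ⟨hk, rfl | hm⟩
        · exact Or.inl rfl
        · by_cases hkp : k = p.1
          · exact Or.inl hkp
          · exact Or.inr ⟨by simp [hk, hkp], hm⟩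

theorem nodup_map_fst_dedupA (L : List (String × String)) :
    ∀ seen, ((dedupA seen L).map Prod.fst).Nodup := by
  induction L with
  | nil => intro seen; simp [dedupA]
  | cons p t ih =>
    intro seen
    rw [dedupA]
    by_cases h : p.1 ∈ seen
    · rw [if_pos h]; exact ih seen
    · rw [if_neg h]
      simp only [List.map_cons, List.nodup_cons]
      refine ⟨fun hm => ?_, ih _⟩
      exact ((mem_map_fst_dedupA t _ p.1).mp hm).1 (by simp)

-- a pair kept by the dedup loop is the FIRST pair of the traversed list carrying its key
theorem find?_of_mem_dedupA (L : List (String × String)) :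
    ∀ seen p, p ∈ dedupA seen L → p.1 ∉ seen ∧ L.find? (fun q => q.1 == p.1) = some p := by
  induction L with
  | nil => intro seen p h; simp [dedupA] at h
  | cons q t ih =>
    intro seen p hp
    rw [dedupA] at hp
    by_cases h : q.1 ∈ seen
    · rw [if_pos h] at hp
      obtain ⟨hns, hf⟩ := ih seen p hp
      have hne : (q.1 == p.1) = false := by
        simp only [beq_eq_false_iff_ne, ne_eq]
        exact fun he => hns (he ▸ h)
      exact ⟨hns, by rw [List.find?_cons, hne]; exact hf⟩
    · rw [if_neg h] at hp
      rcases List.mem_cons.mp hp with rfl | hp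
      · exact ⟨h, by simp⟩
      · obtain ⟨hns, hf⟩ := ih _ p hp
        have hnq : p.1 ≠ q.1 := fun he => hns (by simp [he])
        have hns' : p.1 ∉ seen := fun hs => hns (by simp [hs])
        have hne : (q.1 == p.1) = false := by
          simp only [beq_eq_false_iff_ne, ne_eq]
          exact fun he => hnq he.symm
        exact ⟨hns', by rw [List.find?_cons, hne]; exact hf⟩

-- ===== A side: the dedup of the sorted list IS the canonical list =====
theorem dedupA_eq_canon (props : List (String × String)) :
    dedupA [] (PySem.List.sorted props (fun x => x.1) false) = pvCanon props := by
  set D := dedupA [] (PySem.List.sorted props (fun x => x.1) false) with hD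
  have hnd : (D.map Prod.fst).Nodup := nodup_map_fst_dedupA _ []
  have hmem : ∀ k, k ∈ D.map Prod.fst ↔ k ∈ PySem.Set.ofList (props.map Prod.fst) := by
    intro k
    rw [hD, mem_map_fst_dedupA, PySem.Set.mem_ofList]
    constructor
    · rintro ⟨-, hm⟩
      obtain ⟨p, hp, rfl⟩ := List.mem_map.mp hm
      exact List.mem_map_of_mem ((PySem.List.mem_sorted props (fun x => x.1) false p).mp hp)
    · intro hm
      obtain ⟨p, hp, rfl⟩ := List.mem_map.mp hm
      exact ⟨by simp, List.mem_map_of_mem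
        ((PySem.List.mem_sorted props (fun x => x.1) false p).mpr hp)⟩
  have hperm : (D.map Prod.fst).Perm (PySem.Set.ofList (props.map Prod.fst)) :=
    (List.perm_ext_iff_of_nodup hnd (PySem.Set.nodup_ofList _)).mpr hmem
  have hle : D.Pairwise (fun a b => a.1 ≤ b.1) :=
    (PySem.List.sorted_pairwise props (fun x => x.1)).sublist (hD ▸ dedupA_sublist _ [])
  have hlt : (D.map Prod.fst).Pairwise (· < ·) := by
    rw [List.pairwise_map]
    have hne := List.pairwise_map.mp hnd
    exact (hle.and hne).imp fun h => lt_of_le_of_ne h.1 h.2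
  have hsorted : PySem.List.sorted (PySem.Set.ofList (props.map Prod.fst)) (fun x => x) false
      = D.map Prod.fst :=
    PySem.List.sorted_eq_of_perm_of_pairwise_lt _ _ _ hperm hlt
  rw [pvCanon, hsorted, List.map_map]
  symm
  refine List.map_congr_left ?_ |>.trans (List.map_id D)
  intro p hp
  obtain ⟨-, hf⟩ := find?_of_mem_dedupA _ [] p (hD ▸ hp)
  have hfp : props.find? (fun q => q.1 == p.1) = some p := by
    rw [← find?_sorted]; exact hf
  simp only [Function.comp, pvFv, hfp, Option.map_some, Option.getD_some, id]

-- ===== B side =====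
-- filtering away one name leaves the first match of every OTHER name unchanged
theorem find?_filter_ne (k0 k : String) (hk : k ≠ k0) (L : List (String × String)) :
    (L.filter (fun q => !(q.1 == k0))).find? (fun q => q.1 == k)
      = L.find? (fun q => q.1 == k) := by
  induction L with
  | nil => rfl
  | cons q t ih =>
    by_cases h0 : q.1 = k0
    · have hk0k : (k0 == k) = false := by
        rw [beq_eq_false_iff_ne]
        exact fun h => hk h.symm
      simp [h0, hk0k, ih]
    · by_cases hq : q.1 = k <;> simp [h0, hq, ih, hk]

theorem selParts_eq_canon : ∀ (n : ℕ) (L : List (String × String)), L.length ≤ n →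
    pvSelParts L = (pvCanon L).map pvFmt := by
  intro n
  induction n with
  | zero =>
    intro L hL
    have : L = [] := List.eq_nil_of_length_eq_zero (Nat.le_zero.mp hL)
    subst this
    simp [pvSelParts, pvCanon, PySem.Set.ofList, PySem.List.sorted_eq_nil_iff]
  | succ n ih =>
    intro L hL
    cases L with
    | nil => simp [pvSelParts, pvCanon, PySem.Set.ofList, PySem.List.sorted_eq_nil_iff]
    | cons p t =>
      set k0 := pvSelKey p t with hk0
      have hk0mem : k0 ∈ (p :: t).map Prod.fst := pvSelKey_mem p t
      have hk0min : ∀ y ∈ (p :: t).map Prod.fst, k0 ≤ y := by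
        intro y hy
        have hm : PySem.List.min? ((p :: t).map Prod.fst) (fun x => x) = some k0 := by
          cases hm' : PySem.List.min? ((p :: t).map Prod.fst) (fun x => x) with
          | none => exact absurd ((PySem.List.min?_eq_none_iff _ _).mp hm') (by simp)
          | some m =>
            simp only [List.map_cons] at hm' ⊢
            simp [hk0, pvSelKey, List.map_cons, hm']
        exact PySem.List.min?_isMin hm y hy
      set L' := (p :: t).filter (fun q => !(q.1 == k0)) with hL'
      have hlen : L'.length ≤ n := by
        have hlt : L'.length < (p :: t).length := by
          rw [hL', List.length_filter_lt_length_iff_exists]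
          obtain ⟨q, hq, hqk⟩ := List.mem_map.mp hk0mem
          exact ⟨q, hq, by simp [hqk]⟩
        omega
      have hmemL' : ∀ k, k ∈ L'.map Prod.fst ↔ k ∈ (p :: t).map Prod.fst ∧ k ≠ k0 := by
        intro k
        simp only [hL', List.mem_map, List.mem_filter]
        constructor
        · rintro ⟨q, ⟨hq, hqne⟩, rfl⟩
          exact ⟨⟨q, hq, rfl⟩, by simpa using hqne⟩
        · rintro ⟨⟨q, hq, rfl⟩, hne⟩
          exact ⟨q, ⟨hq, by simpa using hne⟩, rfl⟩
      -- the sorted distinct names of L decompose as k0 :: sorted distinct names of L'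
      set S' := PySem.List.sorted (PySem.Set.ofList (L'.map Prod.fst)) (fun x => x) false
        with hS'
      have hS'mem : ∀ k, k ∈ S' ↔ k ∈ (p :: t).map Prod.fst ∧ k ≠ k0 := by
        intro k
        rw [hS', PySem.List.mem_sorted, PySem.Set.mem_ofList, hmemL']
      have hS'nodup : S'.Nodup := by
        rw [hS']
        exact ((PySem.List.sorted_perm _ _ _).symm).nodup (PySem.Set.nodup_ofList _)
      have hS'lt : S'.Pairwise (· < ·) := by
        rw [hS']
        exact PySem.List.sorted_ofList_pairwise_lt _
      have hhead : (k0 :: S').Pairwise (· < ·) := by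
        refine List.Pairwise.cons ?_ hS'lt
        intro y hy
        obtain ⟨hmem, hne⟩ := (hS'mem y).mp hy
        exact lt_of_le_of_ne (hk0min y hmem) (Ne.symm hne)
      have hheadnodup : (k0 :: S').Nodup := hhead.nodup
      have hpermhead : (k0 :: S').Perm (PySem.Set.ofList ((p :: t).map Prod.fst)) := by
        refine (List.perm_ext_iff_of_nodup hheadnodup (PySem.Set.nodup_ofList _)).mpr ?_
        intro k
        rw [List.mem_cons, hS'mem, PySem.Set.mem_ofList]
        constructor
        · rintro (rfl | ⟨hm, -⟩)
          · exact hk0mem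
          · exact hm
        · intro hm
          by_cases hk : k = k0
          · exact Or.inl hk
          · exact Or.inr ⟨hm, hk⟩
      have hdecomp : PySem.List.sorted (PySem.Set.ofList ((p :: t).map Prod.fst))
          (fun x => x) false = k0 :: S' :=
        PySem.List.sorted_eq_of_perm_of_pairwise_lt _ _ _ hpermhead hhead
      have hfv0 : pvFv (p :: t) k0 = pvSelVal p t := by rw [pvFv, pvSelVal, hk0]
      rw [pvSelParts, pvCanon, hdecomp, List.map_cons, List.map_cons]
      congr 1
      rw [← hk0, ← hL', ih L' hlen, pvCanon, ← hS']
      simp only [List.map_map]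
      apply List.map_congr_left
      intro k hk
      obtain ⟨-, hne⟩ := (hS'mem k).mp hk
      simp only [Function.comp, pvFmt]
      rw [pvFv, pvFv, hL', find?_filter_ne k0 k hne]

theorem canon_nil_iff (L : List (String × String)) : pvCanon L = [] ↔ L = [] := by
  rw [pvCanon, List.map_eq_nil_iff, PySem.List.sorted_eq_nil_iff]
  constructor
  · intro h
    cases L with
    | nil => rfl
    | cons p t =>
      exfalso
      have : p.1 ∈ PySem.Set.ofList ((p :: t).map Prod.fst) := by
        rw [PySem.Set.mem_ofList]; simp
      rw [h] at this; simp at this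
  · rintro rfl; rfl

theorem ab_eq (props : List (String × String)) (fallback_id_col : String) :
    build_named_struct_py props fallback_id_col = build_named_struct_py_alt props fallback_id_col := by
  simp only [build_named_struct_py, build_named_struct_py_alt]
  have hempty : (PySem.Set.empty : PySem.Set String) = [] := rfl
  rw [hempty, foldA_eq, List.nil_append, dedupA_eq_canon,
    selParts_eq_canon props.length props (le_refl _)]
  by_cases hp : props = []
  · subst hp
    simp [pvCanon, PySem.Set.ofList, PySem.List.sorted_eq_nil_iff]
  · have h1 : pvCanon props ≠ [] := fun h => hp ((canon_nil_iff props).mp h)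
    have h2 : (pvCanon props).map pvFmt ≠ [] := by
      simpa [List.map_eq_nil_iff] using h1
    rw [if_pos h1, if_pos h2]
    unfold pvFmt
    rfl

-- ===== VERDICT =====
theorem build_named_struct_py_spec : Claim_equal_build_named_struct_py := by
  intro props fallback_id_col _
  unfold Spec_build_named_struct_py
  exact ab_eq props fallback_id_col
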